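-- pv_equiv track=rewrite | github.com/yusuke-kayahara/chord-analyzer | main.py | optimize_root_octave
-- ===== SOURCE A (Python) =====
-- from typing import List
--
-- NOTES = ['C', 'C#', 'D', 'D#', 'E', 'F', 'F#', 'G', 'G#', 'A', 'A#', 'B']
--
-- def normalize_note(note: str) -> str:
--     """音名を正規化（異名同音を統一）"""
--     replacements = {
--         'Db': 'C#', 'Eb': 'D#', 'Gb': 'F#',
--         'Ab': 'G#', 'Bb': 'A#'
--     }
--     return replacements.get(note, note)
--
-- def note_to_pitch_class(note: str) -> int:
--     """音名をピッチクラス番号に変換"""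
--     normalized_note = normalize_note(note)
--     return NOTES.index(normalized_note) if normalized_note in NOTES else 0
--
-- def optimize_root_octave(root_pc: int, core_notes: List[tuple], base_root_octave: int, base_octave: int) -> int:
--     """ルートオクターブを最適化（実際のボイシング後の音高を考慮）"""
--     if not core_notes:
--         # コア音がない場合は1オクターブ上げて自然なレンジにする
--         return base_root_octave + 1
--
--     # 各コア音の実際の配置オクターブを予測
--     core_octave = base_octave
--     last_pc = -1
--     actual_core_notes = []
--
--     for note, interval in sorted(core_notes, key=lambda x: x[1]):
--         pc = note_to_pitch_class(note)
--         if pc < last_pc:  # 音が下行する場合はオクターブを上げる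
--             core_octave += 1
--         actual_core_notes.append((note, pc, core_octave))
--         last_pc = pc
--
--     # 最低コア音の実際のMIDI番号を計算
--     lowest_core_midi = min((octave + 1) * 12 + pc for _, pc, octave in actual_core_notes)
--
--     # ルートを1オクターブ上げた場合のMIDI番号
--     optimized_root_midi = (base_root_octave + 1 + 1) * 12 + root_pc
--
--     # ルートが最低音を維持できるかチェック
--     if optimized_root_midi < lowest_core_midi:
--         return base_root_octave + 1
--     else:
--         return base_root_octave
-- ===== SOURCE B (Python) =====
-- NOTES = ['C', 'C#', 'D', 'D#', 'E', 'F', 'F#', 'G', 'G#', 'A', 'A#', 'B']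
--
-- def normalize_note(note: str) -> str:
--     replacements = {
--         'Db': 'C#', 'Eb': 'D#', 'Gb': 'F#',
--         'Ab': 'G#', 'Bb': 'A#'
--     }
--     return replacements.get(note, note)
--
-- def note_to_pitch_class(note: str) -> int:
--     normalized_note = normalize_note(note)
--     return NOTES.index(normalized_note) if normalized_note in NOTES else 0
--
-- def optimize_root_octave(root_pc: int, core_notes, base_root_octave: int, base_octave: int) -> int:
--     if not core_notes:
--         return base_root_octave + 1
--     # The predicted voicing never descends in pitch (pitch classes live in 0..11,
--     # and the octave is bumped exactly when the pitch class drops), so the lowest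
--     # core MIDI is simply the first note in interval order, placed in base_octave.
--     first_note = min(core_notes, key=lambda x: x[1])[0]
--     lowest_core_midi = (base_octave + 1) * 12 + note_to_pitch_class(first_note)
--     if (base_root_octave + 2) * 12 + root_pc < lowest_core_midi:
--         return base_root_octave + 1
--     return base_root_octave
-- ===== Notes on version B (the rewrite author's own statement) =====
-- stated objective: faster
-- what changed: B drops A's sort, simulated octave-placement list and min-scan: since the simulated voicing's MIDI values never descend, the lowest core MIDI is just the min-by-interval note placed in the base octave, found in one linear min pass.
import Mathlib
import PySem

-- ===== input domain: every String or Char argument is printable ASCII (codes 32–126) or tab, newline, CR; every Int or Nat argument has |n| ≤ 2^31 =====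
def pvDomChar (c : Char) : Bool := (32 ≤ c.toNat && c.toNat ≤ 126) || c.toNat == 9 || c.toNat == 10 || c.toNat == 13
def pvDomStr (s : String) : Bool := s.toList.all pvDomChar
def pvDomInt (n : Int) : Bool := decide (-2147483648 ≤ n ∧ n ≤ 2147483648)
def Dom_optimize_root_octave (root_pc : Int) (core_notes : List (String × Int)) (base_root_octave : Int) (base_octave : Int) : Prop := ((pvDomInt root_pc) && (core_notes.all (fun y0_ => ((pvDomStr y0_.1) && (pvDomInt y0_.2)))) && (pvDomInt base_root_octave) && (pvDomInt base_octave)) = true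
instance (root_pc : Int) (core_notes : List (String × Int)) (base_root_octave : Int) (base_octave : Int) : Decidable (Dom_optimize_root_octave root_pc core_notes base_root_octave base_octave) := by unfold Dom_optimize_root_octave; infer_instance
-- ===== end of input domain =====

-- B replaces A's sort + octave simulation + min-scan by a single min-by-interval: the simulated
-- voicing's MIDI values never descend, so the lowest core MIDI is the first note in interval order
-- placed in base_octave (objective: faster/simpler — no sort, no simulated octave list).

-- ===== PORT A =====
-- module-level helpers shared by both Python files (identical code in Source A and Source B)
def pvNOTES : List String := ["C", "C#", "D", "D#", "E", "F", "F#", "G", "G#", "A", "A#", "B"]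

def pvReplacements : PySem.Dict String String :=
  PySem.Dict.ofList [("Db", "C#"), ("Eb", "D#"), ("Gb", "F#"), ("Ab", "G#"), ("Bb", "A#")]

def normalize_note (note : String) : String :=
  PySem.Dict.getD pvReplacements note note

def note_to_pitch_class (note : String) : Int :=
  let normalized_note := normalize_note note
  if normalized_note ∈ pvNOTES then (((PySem.List.index? pvNOTES normalized_note).getD 0 : Nat) : Int)
  else 0

-- A's for-loop over the sorted notes, building actual_core_notes (note, pc, core_octave)
def pvLoopA (l : List (String × Int)) (core_octave last_pc : Int) : List (String × Int × Int) :=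
  match l with
  | [] => []
  | (note, _) :: t =>
    let pc := note_to_pitch_class note
    let core_octave' := if pc < last_pc then core_octave + 1 else core_octave
    (note, pc, core_octave') :: pvLoopA t core_octave' pc

def optimize_root_octave (root_pc : Int) (core_notes : List (String × Int)) (base_root_octave : Int) (base_octave : Int) : Int :=
  if core_notes = [] then base_root_octave + 1
  else
    let actual_core_notes := pvLoopA (PySem.List.sorted core_notes (fun x => x.2) false) base_octave (-1)
    -- min(...) over a nonempty generator; .getD 0 is unreachable (actual_core_notes ≠ [] here)
    let lowest_core_midi := (PySem.List.min? (actual_core_notes.map (fun t => (t.2.2 + 1) * 12 + t.2.1)) (fun x => x)).getD 0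
    let optimized_root_midi := (base_root_octave + 1 + 1) * 12 + root_pc
    if optimized_root_midi < lowest_core_midi then base_root_octave + 1
    else base_root_octave

-- ===== PORT B =====
def optimize_root_octave_alt (root_pc : Int) (core_notes : List (String × Int)) (base_root_octave : Int) (base_octave : Int) : Int :=
  if core_notes = [] then base_root_octave + 1
  else
    -- min(core_notes, key=lambda x: x[1])[0]; .getD is unreachable (core_notes ≠ [] here)
    let first_note := ((PySem.List.min? core_notes (fun x => x.2)).getD ("", 0)).1
    let lowest_core_midi := (base_octave + 1) * 12 + note_to_pitch_class first_note
    if (base_root_octave + 2) * 12 + root_pc < lowest_core_midi then base_root_octave + 1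
    else base_root_octave

-- ===== PRECONDITION & SPEC =====
def Spec_optimize_root_octave (root_pc : Int) (core_notes : List (String × Int)) (base_root_octave : Int) (base_octave : Int) (out : Int) : Prop := out = optimize_root_octave_alt root_pc core_notes base_root_octave base_octave
instance (root_pc : Int) (core_notes : List (String × Int)) (base_root_octave : Int) (base_octave : Int) (out : Int) : Decidable (Spec_optimize_root_octave root_pc core_notes base_root_octave base_octave out) := by unfold Spec_optimize_root_octave; infer_instance

-- ===== CLAIM (what is proved, stated in full; the proofs are below) =====
def Claim_equal_optimize_root_octave : Prop := ∀ (root_pc : Int) (core_notes : List (String × Int)) (base_root_octave : Int) (base_octave : Int), Dom_optimize_root_octave root_pc core_notes base_root_octave base_octave → Spec_optimize_root_octave root_pc core_notes base_root_octave base_octave (optimize_root_octave root_pc core_notes base_root_octave base_octave)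

-- ===== LEMMAS AND PROOFS =====

-- every pitch class lies in 0..11
lemma ntpc_bounds (n : String) : 0 ≤ note_to_pitch_class n ∧ note_to_pitch_class n ≤ 11 := by
  unfold note_to_pitch_class
  by_cases h : normalize_note n ∈ pvNOTES
  · simp only [h, if_true]
    rcases (PySem.List.index?_isSome_iff (xs := pvNOTES) (v := normalize_note n)).2 h |> Option.isSome_iff_exists.1 with ⟨k, hk⟩
    obtain ⟨hlt, -, -⟩ := PySem.List.getElem_of_index?_eq_some hk
    have h12 : pvNOTES.length = 12 := by decide
    rw [hk]
    simp only [Option.getD_some]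
    omega
  · simp [h]

-- the MIDI numbers produced by A's loop are all ≥ the MIDI of the previous note
lemma pvLoopA_ge (l : List (String × Int)) :
    ∀ (o lp : Int), 0 ≤ lp → lp ≤ 11 →
      ∀ v ∈ (pvLoopA l o lp).map (fun t => (t.2.2 + 1) * 12 + t.2.1), (o + 1) * 12 + lp ≤ v := by
  induction l with
  | nil => intro o lp _ _ v hv; simp [pvLoopA] at hv
  | cons hd t ih =>
    intro o lp hlp0 hlp11 v hv
    obtain ⟨note, iv⟩ := hd
    have hpc := ntpc_bounds note
    simp only [pvLoopA, List.map_cons, List.mem_cons] at hv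
    rcases hv with rfl | hv
    · split <;> omega
    · have := ih (if note_to_pitch_class note < lp then o + 1 else o) (note_to_pitch_class note)
        hpc.1 hpc.2 v (by simpa using hv)
      split at this <;> omega

-- Python's min(xs, key) is the head of the stable sort by the same key
def pvMinStep (o : Option (String × Int)) (x : String × Int) : Option (String × Int) :=
  match o with
  | none => some x
  | some m => if x.2 < m.2 then some x else some m

lemma min?_eq_foldl (xs : List (String × Int)) :
    PySem.List.min? xs (fun x => x.2) = List.foldl pvMinStep none xs := by
  unfold PySem.List.min?
  apply PySem.List.foldl_congr_mem
  intro acc x _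
  cases acc <;> rfl

lemma head?_insertBy (x : String × Int) (l : List (String × Int)) :
    (PySem.List.insertBy (fun a b => decide (a.2 < b.2)) x l).head? = pvMinStep l.head? x := by
  cases l with
  | nil => simp [PySem.List.insertBy, pvMinStep]
  | cons y ys => by_cases h : x.2 < y.2 <;> simp [PySem.List.insertBy, pvMinStep, h]

lemma foldl_insertBy_head? (ys : List (String × Int)) :
    ∀ acc : List (String × Int),
      (List.foldl (fun a x => PySem.List.insertBy (fun a b => decide (a.2 < b.2)) x a) acc ys).head?
        = List.foldl pvMinStep acc.head? ys := by
  induction ys with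
  | nil => intro acc; rfl
  | cons x t ih =>
    intro acc
    simp only [List.foldl_cons]
    rw [ih, head?_insertBy]

lemma min?_eq_head?_sorted (xs : List (String × Int)) :
    PySem.List.min? xs (fun x => x.2) = (PySem.List.sorted xs (fun x => x.2) false).head? := by
  rw [PySem.List.sorted_eq_foldl_insertBy, foldl_insertBy_head? xs [], List.head?_nil, min?_eq_foldl]

-- ===== VERDICT (by name: the statement is the Claim_ definition above) =====
theorem optimize_root_octave_spec : Claim_equal_optimize_root_octave := by
  intro root_pc core_notes base_root_octave base_octave _
  unfold Spec_optimize_root_octave optimize_root_octave optimize_root_octave_alt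
  by_cases hn : core_notes = []
  · simp [hn]
  · simp only [hn, if_false]
    have hsne : PySem.List.sorted core_notes (fun x => x.2) false ≠ [] := by
      simpa [PySem.List.sorted_eq_nil_iff] using hn
    obtain ⟨m, t, hs⟩ := List.exists_cons_of_ne_nil hsne
    have hmin : PySem.List.min? core_notes (fun x => x.2) = some m := by
      rw [min?_eq_head?_sorted, hs]; rfl
    have hpc := ntpc_bounds m.1
    -- A's loop on the sorted list: first element keeps base_octave
    have hfirst : pvLoopA (PySem.List.sorted core_notes (fun x => x.2) false) base_octave (-1)
        = (m.1, note_to_pitch_class m.1, base_octave) :: pvLoopA t base_octave (note_to_pitch_class m.1) := by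
      rw [hs]
      obtain ⟨mn, miv⟩ := m
      simp only [pvLoopA]
      have hb := ntpc_bounds mn
      have : ¬ note_to_pitch_class mn < (-1 : Int) := by omega
      simp [this]
    rw [hfirst, hmin]
    simp only [List.map_cons, PySem.List.min?_id_cons, Option.getD_some]
    have hrest := pvLoopA_ge t base_octave (note_to_pitch_class m.1) hpc.1 hpc.2
    have hfold := PySem.List.foldl_min_le
      ((pvLoopA t base_octave (note_to_pitch_class m.1)).map (fun t => (t.2.2 + 1) * 12 + t.2.1))
      ((base_octave + 1) * 12 + note_to_pitch_class m.1)
    have hmem := PySem.List.foldl_min_mem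
      ((pvLoopA t base_octave (note_to_pitch_class m.1)).map (fun t => (t.2.2 + 1) * 12 + t.2.1))
      ((base_octave + 1) * 12 + note_to_pitch_class m.1)
    have hminval :
        List.foldl min ((base_octave + 1) * 12 + note_to_pitch_class m.1)
          ((pvLoopA t base_octave (note_to_pitch_class m.1)).map (fun t => (t.2.2 + 1) * 12 + t.2.1))
        = (base_octave + 1) * 12 + note_to_pitch_class m.1 := by
      rcases hmem with h | h
      · exact h
      · exact le_antisymm hfold.1 (hrest _ h)
    rw [hminval]
    have harith : (base_root_octave + 1 + 1) * 12 + root_pc = (base_root_octave + 2) * 12 + root_pc := by ring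
    rw [harith]
    by_cases hc : (base_root_octave + 2) * 12 + root_pc < (base_octave + 1) * 12 + note_to_pitch_class m.1 <;>
      simp [hc]
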